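-- pv_equiv track=rewrite | github.com/stephencombs/hashit | .agent/harness/context_budget.py | _lines_up_to_budget
-- ===== SOURCE A (Python) =====
-- def _lines_up_to_budget(lines, char_budget):
--     out, used = [], 0
--     for line in lines:
--         block = f"- {line}\n"
--         if used + len(block) > char_budget:
--             break
--         out.append(block)
--         used += len(block)
--     return "".join(out)
-- ===== SOURCE B (Python) =====
-- def _lines_up_to_budget(lines, char_budget):
--     # Prefix sums of block lengths (each block "- <line>\n" has len(line)+3 chars),
--     # then BINARY SEARCH for the cutoff instead of a linear accumulate-and-break scan;
--     # correct because the prefix sums are strictly increasing.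
--     sums = []
--     total = 0
--     for line in lines:
--         total += len(line) + 3
--         sums.append(total)
--     lo, hi = 0, len(sums)
--     while lo < hi:
--         mid = (lo + hi) // 2
--         if char_budget < sums[mid]:
--             hi = mid
--         else:
--             lo = mid + 1
--     return "".join("- %s\n" % line for line in lines[:lo])
-- ===== Notes on version B (the rewrite author's own statement) =====
-- stated objective: alternative
-- what changed: Replaces the accumulate-and-break loop over formatted blocks with a two-stage strategy: build the prefix-sum table of block lengths (len(line)+3) in one pass, binary-search it for the cutoff index (valid since the sums are strictly increasing), and join only the blocks before the cutoff.
import Mathlib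
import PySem

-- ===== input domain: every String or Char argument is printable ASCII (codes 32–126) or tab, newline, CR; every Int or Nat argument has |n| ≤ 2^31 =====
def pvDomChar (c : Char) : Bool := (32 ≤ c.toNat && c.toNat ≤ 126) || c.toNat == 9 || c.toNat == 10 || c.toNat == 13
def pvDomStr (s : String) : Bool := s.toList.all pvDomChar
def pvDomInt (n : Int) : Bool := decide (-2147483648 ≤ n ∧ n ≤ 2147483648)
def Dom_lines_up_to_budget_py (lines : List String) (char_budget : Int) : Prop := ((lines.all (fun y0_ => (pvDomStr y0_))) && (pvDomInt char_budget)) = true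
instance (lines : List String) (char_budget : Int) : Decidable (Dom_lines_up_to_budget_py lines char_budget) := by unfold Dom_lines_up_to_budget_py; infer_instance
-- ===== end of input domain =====

-- B replaces A's accumulate-and-break loop with a prefix-sum table plus a binary
-- search for the cutoff index (alternative decomposition, same overall cost).


-- ===== PORT A =====
-- f"- {line}\n"
def pvBlock (line : String) : String :=
  String.ofList ('-' :: ' ' :: line.toList ++ ['\n'])

-- A's for-loop with state (out, used); returning 'out' models the 'break'
def pvLoopA (ls : List String) (char_budget : Int) (used : Int) (out : List String) :
    List String :=
  match ls with
  | [] => out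
  | line :: rest =>
    let block := pvBlock line
    if used + PySem.Str.len block > char_budget then out
    else pvLoopA rest char_budget (used + PySem.Str.len block) (out ++ [block])

def lines_up_to_budget_py (lines : List String) (char_budget : Int) : String :=
  PySem.Str.join "" (pvLoopA lines char_budget 0 [])

-- ===== PORT B =====
-- Source B's first loop: running total 'len(line) + 3' appended to 'sums'
def pvSumsB (ls : List String) (total : Int) : List Int :=
  match ls with
  | [] => []
  | line :: rest =>
    (total + PySem.Str.len line + 3) :: pvSumsB rest (total + PySem.Str.len line + 3)

-- Source B's while-loop binary search; 'sums[mid]' is always in range (lo < hi ≤ len),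
-- so List.getD is exact for the Python indexing here
def pvBisect (sums : List Int) (x : Int) (lo hi : Nat) : Nat :=
  if lo < hi then
    if x < sums.getD ((lo + hi) / 2) 0 then pvBisect sums x lo ((lo + hi) / 2)
    else pvBisect sums x ((lo + hi) / 2 + 1) hi
  else lo
termination_by hi - lo
decreasing_by all_goals omega

def lines_up_to_budget_py_alt (lines : List String) (char_budget : Int) : String :=
  PySem.Str.join ""
    ((lines.take
        (pvBisect (pvSumsB lines 0) char_budget 0 (pvSumsB lines 0).length)).map pvBlock)

-- ===== PRECONDITION & SPEC =====
def Spec_lines_up_to_budget_py (lines : List String) (char_budget : Int) (out : String) : Prop := out = lines_up_to_budget_py_alt lines char_budget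
instance (lines : List String) (char_budget : Int) (out : String) : Decidable (Spec_lines_up_to_budget_py lines char_budget out) := by unfold Spec_lines_up_to_budget_py; infer_instance

-- ===== CLAIM (what is proved, stated in full; the proofs are below) =====
def Claim_equal_lines_up_to_budget_py : Prop := ∀ (lines : List String) (char_budget : Int), Dom_lines_up_to_budget_py lines char_budget → Spec_lines_up_to_budget_py lines char_budget (lines_up_to_budget_py lines char_budget)

-- ===== LEMMAS AND PROOFS =====
lemma pvBlock_len (line : String) :
    PySem.Str.len (pvBlock line) = PySem.Str.len line + 3 := by
  simp [pvBlock, PySem.Str.len_eq]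
  omega

-- A's loop from carried sum 'used' yields 'out' ++ the maximal prefix of blocks
-- whose cumulative length (from 'used') stays ≤ the budget, counted via pvSumsB.
lemma pvLoopA_eq (ls : List String) (b used : Int) (out : List String) :
    pvLoopA ls b used out =
      out ++ (ls.map pvBlock).take
        ((pvSumsB ls used).takeWhile (fun c => decide (c ≤ b))).length := by
  induction ls generalizing used out with
  | nil => simp [pvLoopA, pvSumsB]
  | cons line rest ih =>
    simp only [pvLoopA, pvSumsB, List.map_cons, List.takeWhile_cons, pvBlock_len]
    by_cases h : used + PySem.Str.len line + 3 ≤ b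
    · rw [if_neg (by omega), if_pos (by simpa using h)]
      rw [ih]
      simp [add_assoc]
    · rw [if_pos (by omega), if_neg (by simpa using h)]
      simp

lemma pvSumsB_lower (ls : List String) (t : Int) :
    ∀ a ∈ pvSumsB ls t, t ≤ a := by
  induction ls generalizing t with
  | nil => simp [pvSumsB]
  | cons line rest ih =>
    intro a ha
    simp only [pvSumsB, List.mem_cons] at ha
    have hlen : 0 ≤ PySem.Str.len line := by
      simp [PySem.Str.len_eq]
    rcases ha with rfl | ha
    · omega
    · have := ih (t + PySem.Str.len line + 3) a ha
      omega

lemma pvSumsB_sorted (ls : List String) (t : Int) :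
    (pvSumsB ls t).Pairwise (· ≤ ·) := by
  induction ls generalizing t with
  | nil => simp [pvSumsB]
  | cons line rest ih =>
    simp only [pvSumsB, List.pairwise_cons]
    exact ⟨pvSumsB_lower rest _, ih _⟩

-- elements inside the takeWhile prefix satisfy the predicate
lemma takeWhile_le {s : List Int} {x : Int} {i : Nat}
    (h : i < (s.takeWhile (fun c => decide (c ≤ x))).length) (hi : i < s.length) :
    s[i] ≤ x := by
  have hpre := List.takeWhile_prefix (l := s) (p := fun c => decide (c ≤ x))
  have := hpre.getElem h
  have hmem : (s.takeWhile (fun c => decide (c ≤ x)))[i] ∈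
      s.takeWhile (fun c => decide (c ≤ x)) := List.getElem_mem h
  have hp := List.mem_takeWhile_imp hmem
  rw [this] at hp
  simpa using hp

-- the first element after the takeWhile prefix fails the predicate
lemma takeWhile_gt {s : List Int} {x : Int}
    (h : (s.takeWhile (fun c => decide (c ≤ x))).length < s.length) :
    x < s[(s.takeWhile (fun c => decide (c ≤ x))).length] := by
  induction s with
  | nil => simp at h
  | cons a t ih =>
    by_cases ha : a ≤ x
    · have hw : List.takeWhile (fun c => decide (c ≤ x)) (a :: t) =
          a :: List.takeWhile (fun c => decide (c ≤ x)) t := by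
        simp [ha]
      simp only [hw, List.length_cons] at h ⊢
      simpa using ih (by omega)
    · have hw : List.takeWhile (fun c => decide (c ≤ x)) (a :: t) = [] := by
        simp [ha]
      simp only [hw, List.length_nil, List.getElem_cons_zero]
      omega

-- binary search over a sorted list lands exactly on the takeWhile cutoff
lemma pvBisect_eq (s : List Int) (x : Int) (hs : s.Pairwise (· ≤ ·)) :
    ∀ (lo hi : Nat), lo ≤ (s.takeWhile (fun c => decide (c ≤ x))).length →
      (s.takeWhile (fun c => decide (c ≤ x))).length ≤ hi → hi ≤ s.length →
      pvBisect s x lo hi = (s.takeWhile (fun c => decide (c ≤ x))).length := by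
  set k := (s.takeWhile (fun c => decide (c ≤ x))).length with hk
  have hsort : ∀ (i j : Nat) (hi : i < s.length) (hj : j < s.length),
      i ≤ j → s[i] ≤ s[j] := by
    intro i j hi hj hij
    rcases Nat.eq_or_lt_of_le hij with rfl | hlt
    · exact le_refl _
    · exact (List.pairwise_iff_getElem.mp hs) i j hi hj hlt
  intro lo hi
  induction hn : hi - lo using Nat.strong_induction_on generalizing lo hi with
  | _ n ih =>
    intro hlok hkhi hhil
    rw [pvBisect]
    by_cases hlh : lo < hi
    · rw [if_pos hlh]
      have hmid1 : lo ≤ (lo + hi) / 2 := by omega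
      have hmid2 : (lo + hi) / 2 < hi := by omega
      have hmidl : (lo + hi) / 2 < s.length := by omega
      rw [List.getD_eq_getElem _ _ hmidl]
      by_cases hx : x < s[(lo + hi) / 2]
      · rw [if_pos hx]
        have hkmid : k ≤ (lo + hi) / 2 := by
          by_contra hc
          have := takeWhile_le (s := s) (x := x)
            (i := (lo + hi) / 2) (by omega) hmidl
          omega
        exact ih ((lo + hi) / 2 - lo) (by omega) lo ((lo + hi) / 2) rfl hlok hkmid (by omega)
      · rw [if_neg hx]
        push Not at hx
        have hmidk : (lo + hi) / 2 < k := by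
          by_contra hc
          push Not at hc
          have hkl : k < s.length := by omega
          have h1 := takeWhile_gt (s := s) (x := x) (by omega)
          have h2 := hsort k ((lo + hi) / 2) hkl hmidl hc
          simp only [← hk] at h1
          linarith
        exact ih (hi - ((lo + hi) / 2 + 1)) (by omega) ((lo + hi) / 2 + 1) hi rfl
          (by omega) hkhi hhil
    · rw [if_neg hlh]
      omega

-- ===== VERDICT (by name: the statement is the Claim_ definition above) =====
theorem lines_up_to_budget_py_spec : Claim_equal_lines_up_to_budget_py := by
  intro lines char_budget _
  show _ = _
  unfold lines_up_to_budget_py lines_up_to_budget_py_alt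
  rw [pvLoopA_eq]
  have hk : ((pvSumsB lines 0).takeWhile (fun c => decide (c ≤ char_budget))).length ≤
      (pvSumsB lines 0).length := (List.takeWhile_prefix _).length_le
  rw [pvBisect_eq (pvSumsB lines 0) char_budget (pvSumsB_sorted lines 0) 0
    (pvSumsB lines 0).length (Nat.zero_le _) hk (le_refl _)]
  simp [List.map_take]
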